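-- pv_equiv track=rewrite | github.com/Forward-UIUC-2021F/angeline-prabakar-keyword-usage-within-domain | searching/database_internal.py | finding_year_frequency
-- ===== SOURCE A (Python) =====
-- import collections
--
-- def finding_year_frequency(myresults):
--     year_frequency = {}
--     for x in myresults:
--         sql_year = x['year']
--         sql_frequency = x['frequency']
--
--         if sql_year not in year_frequency:
--             year_frequency[sql_year] = sql_frequency
--         elif sql_year in year_frequency:
--             year_frequency[sql_year] += sql_frequency
--     year_frequency = collections.OrderedDict(sorted(year_frequency.items()))
--     return year_frequency
-- ===== SOURCE B (Python) =====
-- def finding_year_frequency(myresults):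
--     years = sorted({x['year'] for x in myresults})
--     return {y: sum(x['frequency'] for x in myresults if x['year'] == y)
--             for y in years}
-- ===== Notes on version B (the rewrite author's own statement) =====
-- stated objective: idiomatic
-- what changed: B replaces A's single-pass dict accumulation followed by sorting the items with a sorted set of distinct years and a per-year sum comprehension (sorted(set)-then-sum instead of hash-accumulate-then-sort).
import Mathlib
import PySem

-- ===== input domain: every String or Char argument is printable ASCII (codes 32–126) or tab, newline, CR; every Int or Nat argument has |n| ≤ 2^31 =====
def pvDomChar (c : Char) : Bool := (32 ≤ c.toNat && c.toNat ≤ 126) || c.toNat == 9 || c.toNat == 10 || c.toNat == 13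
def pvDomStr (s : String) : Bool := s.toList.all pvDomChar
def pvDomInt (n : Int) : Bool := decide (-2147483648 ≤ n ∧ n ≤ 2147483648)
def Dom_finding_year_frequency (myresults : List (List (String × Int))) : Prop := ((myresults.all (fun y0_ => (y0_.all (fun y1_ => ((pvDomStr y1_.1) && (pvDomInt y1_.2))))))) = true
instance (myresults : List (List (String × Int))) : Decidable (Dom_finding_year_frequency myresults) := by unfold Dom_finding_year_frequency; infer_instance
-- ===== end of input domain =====

-- B replaces A's hash-accumulate-then-sort-items strategy by a sorted-distinct-years pass with a
-- per-year sum comprehension (objective: simpler/idiomatic; not claimed faster).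

-- x['year'] / x['frequency'] on a row x (a Python dict, here its association list): first match.
def pvYear (x : List (String × Int)) : Int := (PySem.Dict.mk x).getD "year" 0
def pvFreq (x : List (String × Int)) : Int := (PySem.Dict.mk x).getD "frequency" 0

-- ===== PORT A =====
def finding_year_frequency (myresults : List (List (String × Int))) : List (Int × Int) :=
  let year_frequency : PySem.Dict Int Int :=
    myresults.foldl (fun d x =>
      let sql_year := pvYear x
      let sql_frequency := pvFreq x
      if d.contains sql_year = false then d.insert sql_year sql_frequency
      else if d.contains sql_year = true then d.insert sql_year (d.getD sql_year 0 + sql_frequency)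
      else d) (PySem.Dict.mk [])
  PySem.List.sorted2 year_frequency.items (fun p => p.1) (fun p => p.2)

-- ===== PORT B =====
def finding_year_frequency_alt (myresults : List (List (String × Int))) : List (Int × Int) :=
  let years := PySem.List.sorted (PySem.Set.ofList (myresults.map (fun x => pvYear x))) (fun y => y)
  years.map (fun y => (y, ((myresults.filter (fun x => pvYear x == y)).map (fun x => pvFreq x)).sum))

-- ===== PRECONDITION & SPEC =====
-- Pre_ excludes exactly the rows on which Python's x['year'] or x['frequency'] raises KeyError.
def Pre_finding_year_frequency (myresults : List (List (String × Int))) : Prop :=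
  ∀ x ∈ myresults, (PySem.Dict.mk x).contains "year" = true ∧ (PySem.Dict.mk x).contains "frequency" = true
instance (myresults : List (List (String × Int))) : Decidable (Pre_finding_year_frequency myresults) := by unfold Pre_finding_year_frequency; infer_instance

def pvWitness_finding_year_frequency : (List (List (String × Int))) :=
  [[("year", 2001), ("frequency", 3)], [("year", 1999), ("frequency", 4)], [("year", 2001), ("frequency", 5)]]

def Spec_finding_year_frequency (myresults : List (List (String × Int))) (out : List (Int × Int)) : Prop := out = finding_year_frequency_alt myresults
instance (myresults : List (List (String × Int))) (out : List (Int × Int)) : Decidable (Spec_finding_year_frequency myresults out) := by unfold Spec_finding_year_frequency; infer_instance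

-- ===== CLAIM (what is proved, stated in full; the proofs are below) =====
def Claim_equal_finding_year_frequency : Prop := ∀ (myresults : List (List (String × Int))), Dom_finding_year_frequency myresults → Pre_finding_year_frequency myresults → Spec_finding_year_frequency myresults (finding_year_frequency myresults)

-- ===== LEMMAS AND PROOFS =====

-- A's loop body, written uniformly: both live branches insert getD+f (getD of an absent key is 0).
theorem pvBody_eq :
    (fun (d : PySem.Dict Int Int) (x : List (String × Int)) =>
      let sql_year := pvYear x
      let sql_frequency := pvFreq x
      if d.contains sql_year = false then d.insert sql_year sql_frequency
      else if d.contains sql_year = true then d.insert sql_year (d.getD sql_year 0 + sql_frequency)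
      else d)
    = (fun d x => d.insert (pvYear x) (d.getD (pvYear x) 0 + pvFreq x)) := by
  funext d x
  by_cases h : d.contains (pvYear x) = true
  · simp [h]
  · have h' : d.items.any (fun p => p.1 == pvYear x) = false := by
      exact Bool.eq_false_iff.mpr h
    have h0 : (d.get? (pvYear x)) = none := by
      simp only [PySem.Dict.get?, Option.map_eq_none_iff]
      rw [List.find?_eq_none]
      intro p hp
      simpa using (List.any_eq_false.mp h') p hp
    simp [h, PySem.Dict.getD, h0]

-- the accumulated value at key y is the per-year sum
theorem pvGetD_loop (l : List (List (String × Int))) (d : PySem.Dict Int Int) (y : Int) :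
    ((l.foldl (fun d x => d.insert (pvYear x) (d.getD (pvYear x) 0 + pvFreq x)) d).getD y 0)
      = d.getD y 0 + ((l.filter (fun x => pvYear x == y)).map (fun x => pvFreq x)).sum := by
  induction l generalizing d with
  | nil => simp
  | cons a t ih =>
      by_cases h : pvYear a = y
      · simp [List.foldl_cons, ih, h]
        ring
      · have h' : ¬ (y = pvYear a) := fun e => h e.symm
        simp [List.foldl_cons, ih, PySem.Dict.getD_insert, h, h']

-- insertion with an agreeing comparison gives the same list
theorem pvInsertBy_congr (before before' : (Int × Int) → (Int × Int) → Bool) (x : Int × Int)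
    (ys : List (Int × Int)) (h : ∀ b ∈ ys, before x b = before' x b) :
    PySem.List.insertBy before x ys = PySem.List.insertBy before' x ys := by
  induction ys with
  | nil => rfl
  | cons b t ih =>
      simp only [PySem.List.insertBy]
      rw [h b (by simp)]
      by_cases hb : before' x b = true
      · simp [hb]
      · simp [hb, ih (fun c hc => h c (by simp [hc]))]

theorem pvFoldl_insertBy_congr (before before' : (Int × Int) → (Int × Int) → Bool)
    (xs acc : List (Int × Int))
    (h : ∀ a b : Int × Int, (a ∈ xs ∨ a ∈ acc) → (b ∈ xs ∨ b ∈ acc) → before a b = before' a b) :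
    xs.foldl (fun acc x => PySem.List.insertBy before x acc) acc
      = xs.foldl (fun acc x => PySem.List.insertBy before' x acc) acc := by
  induction xs generalizing acc with
  | nil => rfl
  | cons a t ih =>
      simp only [List.foldl_cons]
      rw [pvInsertBy_congr before before' a acc
        (fun b hb => h a b (Or.inl (by simp)) (Or.inr hb))]
      exact ih (PySem.List.insertBy before' a acc)
        (fun p q hp hq => by
          refine h p q ?_ ?_
          · rcases hp with hp | hp
            · exact Or.inl (by simp [hp])
            · rcases (PySem.List.mem_insertBy before' a p acc).1 hp with h' | h'
              · exact Or.inl (by simp [h'])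
              · exact Or.inr h'
          · rcases hq with hq | hq
            · exact Or.inl (by simp [hq])
            · rcases (PySem.List.mem_insertBy before' a q acc).1 hq with h' | h'
              · exact Or.inl (by simp [h'])
              · exact Or.inr h')

-- sorting pairs with Python's tuple order = sorting by the first component, when first components are distinct
theorem pvSorted2_eq_sorted (xs : List (Int × Int)) (hnd : (xs.map Prod.fst).Nodup) :
    PySem.List.sorted2 xs (fun p => p.1) (fun p => p.2)
      = PySem.List.sorted xs (fun p => p.1) := by
  rw [PySem.List.sorted_eq_foldl_insertBy]
  show xs.foldl (fun acc x => PySem.List.insertBy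
      (fun a b => decide (a.1 < b.1) || (!decide (b.1 < a.1) && decide (a.2 < b.2))) x acc) []
    = _
  refine pvFoldl_insertBy_congr _ _ xs [] ?_
  intro a b ha hb
  simp only [List.mem_nil_iff, or_false] at ha hb
  by_cases h1 : a.1 = b.1
  · have : a = b := List.inj_on_of_nodup_map hnd ha hb h1
    subst this
    simp
  · by_cases h2 : a.1 < b.1
    · simp [h2]
    · have : b.1 < a.1 := lt_of_le_of_ne (not_lt.1 h2) (fun h => h1 h.symm)
      simp [h2, this]

-- ===== VERDICT (by name: the statement is the Claim_ definition above) =====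
theorem finding_year_frequency_spec : Claim_equal_finding_year_frequency := by
  intro myresults _ _
  unfold Spec_finding_year_frequency finding_year_frequency finding_year_frequency_alt
  simp only [pvBody_eq]
  set d := myresults.foldl (fun d x => d.insert (pvYear x) (d.getD (pvYear x) 0 + pvFreq x))
    (PySem.Dict.mk []) with hd
  have hkeys : d.keys = PySem.Set.ofList (myresults.map (fun x => pvYear x)) := by
    rw [hd, PySem.Dict.keys_foldl_insert_key myresults (fun x => pvYear x)
      (fun d x => d.getD (pvYear x) 0 + pvFreq x) (PySem.Dict.mk [])]
    rw [PySem.Set.ofList_eq_foldl]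
    rfl
  have hnd : d.keys.Nodup := by
    rw [hkeys]; exact PySem.Set.nodup_ofList _
  have hval : ∀ y : Int, d.getD y 0
      = ((myresults.filter (fun x => pvYear x == y)).map (fun x => pvFreq x)).sum := by
    intro y
    rw [hd, pvGetD_loop]
    simp [PySem.Dict.getD, PySem.Dict.get?]
  have hitems : d.items = d.keys.map (fun k => (k, d.getD k 0)) :=
    PySem.Dict.items_eq_map_keys d hnd 0
  have hndfst : (d.items.map Prod.fst).Nodup := by
    rw [hitems, List.map_map]
    simpa [Function.comp_def] using hnd
  rw [pvSorted2_eq_sorted d.items hndfst]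
  -- name the sorted order: B's list is a strictly-increasing permutation of d.items
  have hsorted := PySem.List.sorted_ofList_pairwise_lt (myresults.map (fun x => pvYear x))
  set ys := PySem.List.sorted (PySem.Set.ofList (myresults.map (fun x => pvYear x))) (fun y => y)
    with hys
  have hperm : (ys.map (fun y => (y, d.getD y 0))).Perm d.items := by
    have hyk : ys.Perm d.keys := by rw [hkeys]; exact PySem.List.sorted_perm _ _ _
    rw [hitems]
    exact hyk.map _
  have hpair : (ys.map (fun y => (y, d.getD y 0))).Pairwise (fun a b => a.1 < b.1) := by
    exact List.Pairwise.map _ (fun a b h => by simpa using h) hsorted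
  rw [PySem.List.sorted_eq_of_perm_of_pairwise_lt d.items (ys.map (fun y => (y, d.getD y 0)))
    (fun p => p.1) hperm hpair]
  simp only [hval]
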